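-- pv_equiv track=rewrite | github.com/deezer/interpretable_nn_attribution | models/interpretable_utils_matrix.py | generate_tr
-- ===== SOURCE A (Python) =====
-- def generate_tr(S):
--     '''
--     Returns a boolean list of inclusions (slow method but easier to follow)
--     * S: Boolean[][]
--     '''
--     assert len(S) > 0
--     H = len(S)
--     N = len(S[0])
--     tr_mat = [[False for h in range(H)] for i in range(H)]
--
--     for i in range(H):
--         for j in range(H):
--             is_included = True
--             for k in range(N):
--                 if S[i][k] and not S[j][k]:
--                     is_included = False
--                     break
--             tr_mat[i][j] = is_included
--     return tr_mat
-- ===== SOURCE B (Python) =====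
-- def generate_tr(S):
--     '''
--     Returns a boolean list of inclusions.
--     * S: Boolean[][]
--     Packs each row's first N entries into an integer bitmask; row i is
--     included in row j iff (mask_i | mask_j) == mask_j.
--     '''
--     N = len(S[0])
--     masks = []
--     for row in S:
--         m = 0
--         for k in range(N):
--             if row[k]:
--                 m |= 1 << k
--         masks.append(m)
--     return [[(mi | mj) == mj for mj in masks] for mi in masks]
-- ===== Notes on version B (the rewrite author's own statement) =====
-- stated objective: faster
-- what changed: Replaces the O(H^2*N) triple loop of elementwise subset checks by packing each row once into an integer bitmask and testing inclusion with a single (mi | mj) == mj word operation per pair.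
import Mathlib
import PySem

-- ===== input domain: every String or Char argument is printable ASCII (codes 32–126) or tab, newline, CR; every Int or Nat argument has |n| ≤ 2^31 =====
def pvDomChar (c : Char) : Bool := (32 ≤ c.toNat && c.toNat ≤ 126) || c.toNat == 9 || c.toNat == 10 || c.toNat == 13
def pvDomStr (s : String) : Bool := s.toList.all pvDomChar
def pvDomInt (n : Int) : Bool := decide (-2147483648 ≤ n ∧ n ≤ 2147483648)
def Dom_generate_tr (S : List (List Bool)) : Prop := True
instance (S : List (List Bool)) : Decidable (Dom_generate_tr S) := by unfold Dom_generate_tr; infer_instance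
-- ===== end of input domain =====

-- B packs each row once into an integer bitmask and tests inclusion with one (mi | mj) == mj word operation per pair (objective: faster, constant-factor).

-- ===== PORT A =====
-- the inner 'for k in range(N): … break' loop of A
def pvALoop (a b : List Bool) (N k : Nat) : Bool :=
  if k < N then
    if ((PySem.List.pyGet? a (k : Int)).getD false) && !((PySem.List.pyGet? b (k : Int)).getD false) then
      false
    else
      pvALoop a b N (k + 1)
  else true
termination_by N - k

def generate_tr (S : List (List Bool)) : List (List Bool) :=
  let H := S.length
  let N := ((PySem.List.pyGet? S 0).getD []).length
  (List.range H).map fun (i : Nat) =>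
    (List.range H).map fun (j : Nat) =>
      pvALoop ((PySem.List.pyGet? S (i : Int)).getD [])
              ((PySem.List.pyGet? S (j : Int)).getD []) N 0

-- ===== PORT B =====
-- mask of the first N entries of a row (Source B's inner packing loop)
def pvMask (row : List Bool) (N : Nat) : Nat :=
  (List.range N).foldl
    (fun (m : Nat) (k : Nat) =>
      if (PySem.List.pyGet? row (k : Int)).getD false then m ||| (1 <<< k) else m) 0

def generate_tr_alt (S : List (List Bool)) : List (List Bool) :=
  let N := ((PySem.List.pyGet? S 0).getD []).length
  let masks := S.map (fun row => pvMask row N)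
  masks.map fun mi => masks.map fun mj => (mi ||| mj) == mj

-- ===== PRECONDITION & SPEC =====
-- Pre_ excludes exactly the inputs where Python A raises: the empty list (assert) and
-- ragged inputs with some row shorter than len(S[0]) (IndexError at the diagonal pass).
def Pre_generate_tr (S : List (List Bool)) : Prop :=
  S ≠ [] ∧ ∀ r ∈ S, (S.headD []).length ≤ r.length
instance (S : List (List Bool)) : Decidable (Pre_generate_tr S) := by
  unfold Pre_generate_tr; infer_instance
def pvWitness_generate_tr : List (List Bool) := [[true, false], [true, true]]

def Spec_generate_tr (S : List (List Bool)) (out : List (List Bool)) : Prop := out = generate_tr_alt S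
instance (S : List (List Bool)) (out : List (List Bool)) : Decidable (Spec_generate_tr S out) := by unfold Spec_generate_tr; infer_instance

-- ===== CLAIM (what is proved, stated in full; the proofs are below) =====
def Claim_equal_generate_tr : Prop := ∀ (S : List (List Bool)), Dom_generate_tr S → Pre_generate_tr S → Spec_generate_tr S (generate_tr S)

-- ===== LEMMAS AND PROOFS =====

-- bits of the packed mask
theorem pvMask_testBit (row : List Bool) (N : Nat) (t : Nat) :
    (pvMask row N).testBit t = (decide (t < N) && (row[t]?).getD false) := by
  induction N with
  | zero => simp [pvMask, Nat.zero_testBit]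
  | succ n ih =>
    have hstep : pvMask row (n+1) =
        (if (row[n]?).getD false then pvMask row n ||| (1 <<< n) else pvMask row n) := by
      simp only [pvMask, List.range_succ, List.foldl_append, List.foldl_cons, List.foldl_nil,
        PySem.List.pyGet?_natCast]
    rw [hstep]
    by_cases hb : (row[n]?).getD false = true
    · rw [if_pos hb, Nat.testBit_or, ih, Nat.one_shiftLeft, Nat.testBit_two_pow]
      by_cases ht : t = n
      · subst ht
        simp only [decide_true, Bool.or_true]
        have hd : decide (t < t + 1) = true := decide_eq_true (Nat.lt_succ_self t)
        rw [hd, hb]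
        rfl
      · rw [decide_eq_false (Ne.symm ht), Bool.or_false]
        congr 2
        apply propext
        constructor
        · exact fun h => Nat.lt_succ_of_lt h
        · intro h; omega
    · simp only [Bool.not_eq_true] at hb
      rw [if_neg (by simp [hb]), ih]
      by_cases ht : t = n
      · subst ht; simp [hb]
      · congr 2
        apply propext
        constructor
        · exact fun h => Nat.lt_succ_of_lt h
        · intro h; omega

theorem pvOr_eq_iff (x y : Nat) : (x ||| y = y) ↔ ∀ t, x.testBit t = true → y.testBit t = true := by
  constructor
  · intro h t hx
    have h2 := congrArg (fun z => z.testBit t) h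
    simpa [Nat.testBit_or, hx] using h2
  · intro h
    apply Nat.eq_of_testBit_eq
    intro t
    rw [Nat.testBit_or]
    cases hx : x.testBit t
    · simp
    · simp [h t hx]

-- characterisation of A's inner loop
theorem pvALoop_char (a b : List Bool) (N : Nat) :
    ∀ k, pvALoop a b N k =
      decide (∀ t, k ≤ t → t < N → (a[t]?).getD false = true → (b[t]?).getD false = true) := by
  intro k
  induction hN : N - k generalizing k with
  | zero =>
    have hk : ¬ k < N := by omega
    rw [pvALoop, if_neg hk]
    have h : ∀ t, k ≤ t → t < N → (a[t]?).getD false = true → (b[t]?).getD false = true := by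
      intro t h1 h2; omega
    exact (decide_eq_true h).symm
  | succ n ih =>
    have hlt : k < N := by omega
    rw [pvALoop, if_pos hlt]
    simp only [PySem.List.pyGet?_natCast]
    by_cases hcond : (a[k]?).getD false = true ∧ (b[k]?).getD false = false
    · rw [if_pos (by simp [hcond.1, hcond.2])]
      have h : ¬ (∀ t, k ≤ t → t < N → (a[t]?).getD false = true → (b[t]?).getD false = true) := by
        intro h
        have h2 := h k (le_refl k) hlt hcond.1
        rw [hcond.2] at h2; exact absurd h2 (by simp)
      simp [h]
    · have hneg : ((a[k]?).getD false && !(b[k]?).getD false) = false := by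
        cases h1 : (a[k]?).getD false <;> cases h2 : (b[k]?).getD false <;> simp_all
      rw [if_neg (by simp [hneg])]
      rw [ih (k+1) (by omega)]
      congr 1
      apply propext
      constructor
      · intro h t h1 h2 h3
        rcases Nat.eq_or_lt_of_le h1 with heq | h1'
        · rw [← heq] at h3 ⊢
          cases h2' : (b[k]?).getD false
          · exact absurd ⟨h3, h2'⟩ hcond
          · rfl
        · exact h t h1' h2 h3
      · intro h t h1 h2 h3
        exact h t (by omega) h2 h3

-- pointwise agreement of the two tests
theorem pvCell_eq (a b : List Bool) (N : Nat) :
    pvALoop a b N 0 = ((pvMask a N ||| pvMask b N) == pvMask b N) := by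
  rw [pvALoop_char a b N 0]
  have key : (pvMask a N ||| pvMask b N = pvMask b N) ↔
      (∀ t, 0 ≤ t → t < N → (a[t]?).getD false = true → (b[t]?).getD false = true) := by
    rw [pvOr_eq_iff]
    constructor
    · intro h t _ ht ha'
      have h2 := h t
      rw [pvMask_testBit a N t, pvMask_testBit b N t] at h2
      simp only [Bool.and_eq_true, decide_eq_true_eq] at h2
      exact (h2 ⟨ht, ha'⟩).2
    · intro h t hx
      rw [pvMask_testBit a N t] at hx
      rw [pvMask_testBit b N t]
      simp only [Bool.and_eq_true, decide_eq_true_eq] at *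
      exact ⟨hx.1, h t (Nat.zero_le t) hx.1 hx.2⟩
  cases hB : ((pvMask a N ||| pvMask b N) == pvMask b N)
  · have hne := (beq_eq_false_iff_ne).mp hB
    exact decide_eq_false (fun h => hne (key.mpr h))
  · have heq := (beq_iff_eq).mp hB
    exact decide_eq_true (key.mp heq)

-- mapping over range(len xs) with python indexing = mapping over xs
theorem pvRangeMap {α β : Type} (xs : List α) (d : α) (g : α → β) :
    (List.range xs.length).map (fun (i : Nat) => g ((PySem.List.pyGet? xs (i : Int)).getD d)) = xs.map g := by
  apply List.ext_getElem
  · simp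
  · intro i h1 h2
    simp only [List.getElem_map, List.getElem_range, PySem.List.pyGet?_natCast]
    simp only [List.length_map] at h2
    rw [List.getElem?_eq_getElem h2]
    rfl

-- ===== VERDICT (by name: the statement is the Claim_ definition above) =====
theorem generate_tr_spec : Claim_equal_generate_tr := by
  intro S _ _
  unfold Spec_generate_tr generate_tr generate_tr_alt
  simp only []
  set N := ((PySem.List.pyGet? S 0).getD []).length with hNdef
  rw [pvRangeMap S [] (fun a => (List.range S.length).map fun (j : Nat) =>
        pvALoop a ((PySem.List.pyGet? S (j : Int)).getD []) N 0)]
  rw [List.map_map]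
  apply List.map_congr_left
  intro a _
  rw [pvRangeMap S [] (fun b => pvALoop a b N 0)]
  simp only [Function.comp]
  rw [List.map_map]
  apply List.map_congr_left
  intro b _
  exact pvCell_eq a b N
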